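-- pv_equiv track=rewrite | github.com/Nepumi-Jr/SQL-Judge | StandardJudge/compare_create.py | compareType
-- ===== SOURCE A (Python) =====
-- def compareType(sol:str, user:str):
--     groupTypes = [ # for mysql
--         ("integer", ["BIT", "TINYINT", "SMALLINT", "MEDIUMINT", "INT", "INTEGER", "BIGINT"]),
--         ("real", ["FLOAT", "DOUBLE", "DECIMAL", "DOUBLE PRECISION"]),
--         ("string", ["CHAR", "VARCHAR", "TINYTEXT", "TEXT", "MEDIUMTEXT", "LONGTEXT"]),
--         ("binary", ["BINARY", "VARBINARY", "TINYBLOB", "BLOB", "MEDIUMBLOB", "LONGBLOB"]),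
--         ("date", ["DATE", "TIME", "YEAR", "DATETIME", "TIMESTAMP"]),
--         ("enum", ["ENUM", "SET"])
--     ]
--
--     if "(" in sol:
--         sol = sol.split("(")[0].strip()
--
--     if "(" in user:
--         user = user.split("(")[0].strip()
--
--     for groupType in groupTypes:
--         if sol.upper() in groupType[1] and user.upper() in groupType[1]:
--             return True
--     return False
-- ===== SOURCE B (Python) =====
-- _GROUP_TABLE = [  # for mysql
--     ("integer", ["BIT", "TINYINT", "SMALLINT", "MEDIUMINT", "INT", "INTEGER", "BIGINT"]),
--     ("real", ["FLOAT", "DOUBLE", "DECIMAL", "DOUBLE PRECISION"]),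
--     ("string", ["CHAR", "VARCHAR", "TINYTEXT", "TEXT", "MEDIUMTEXT", "LONGTEXT"]),
--     ("binary", ["BINARY", "VARBINARY", "TINYBLOB", "BLOB", "MEDIUMBLOB", "LONGBLOB"]),
--     ("date", ["DATE", "TIME", "YEAR", "DATETIME", "TIMESTAMP"]),
--     ("enum", ["ENUM", "SET"]),
-- ]
--
-- # flatten the table once: uppercase type name -> group label
-- _TYPE_GROUP = {}
-- for _label, _names in _GROUP_TABLE:
--     for _name in _names:
--         _TYPE_GROUP[_name] = _label
--
--
-- def _base(s: str) -> str:
--     if "(" in s: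
--         s = s.split("(")[0].strip()
--     return s
--
--
-- def compareType(sol: str, user: str):
--     g1 = _TYPE_GROUP.get(_base(sol).upper())
--     g2 = _TYPE_GROUP.get(_base(user).upper())
--     return g1 is not None and g1 == g2
-- ===== Notes on version B (the rewrite author's own statement) =====
-- stated objective: simpler
-- what changed: Replaces the per-group membership scan over the groupTypes table with a name-to-group dict built once by flattening the table; compareType strips and uppercases each argument with a shared helper, does two dict lookups and returns whether both found the same (non-None) group.
import Mathlib
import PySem

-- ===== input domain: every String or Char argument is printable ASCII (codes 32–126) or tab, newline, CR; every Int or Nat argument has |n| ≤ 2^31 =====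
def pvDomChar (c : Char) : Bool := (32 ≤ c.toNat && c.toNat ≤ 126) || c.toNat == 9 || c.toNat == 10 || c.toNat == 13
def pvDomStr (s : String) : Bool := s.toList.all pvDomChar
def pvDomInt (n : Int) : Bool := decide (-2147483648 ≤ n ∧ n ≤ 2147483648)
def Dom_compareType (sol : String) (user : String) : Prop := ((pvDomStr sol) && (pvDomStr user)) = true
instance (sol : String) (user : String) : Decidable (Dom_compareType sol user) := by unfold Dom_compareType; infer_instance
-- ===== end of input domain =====

-- B replaces A's per-group membership scan with a flattened name→group dict built once and two lookups; objective: simpler.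

-- ===== PORT A =====
def pvGroupTypes : List (String × List String) := [
  ("integer", ["BIT", "TINYINT", "SMALLINT", "MEDIUMINT", "INT", "INTEGER", "BIGINT"]),
  ("real", ["FLOAT", "DOUBLE", "DECIMAL", "DOUBLE PRECISION"]),
  ("string", ["CHAR", "VARCHAR", "TINYTEXT", "TEXT", "MEDIUMTEXT", "LONGTEXT"]),
  ("binary", ["BINARY", "VARBINARY", "TINYBLOB", "BLOB", "MEDIUMBLOB", "LONGBLOB"]),
  ("date", ["DATE", "TIME", "YEAR", "DATETIME", "TIMESTAMP"]),
  ("enum", ["ENUM", "SET"])]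

def compareType (sol : String) (user : String) : Bool :=
  let sol := if PySem.Str.isIn "(" sol
    then PySem.Str.strip (((PySem.Str.split? sol "(").getD []).headD "")
    else sol
  let user := if PySem.Str.isIn "(" user
    then PySem.Str.strip (((PySem.Str.split? user "(").getD []).headD "")
    else user
  -- 'for … : if … : return True / return False' = any over the list
  pvGroupTypes.any (fun g => g.2.contains (PySem.Str.upper sol) && g.2.contains (PySem.Str.upper user))

-- ===== PORT B =====
-- Source B's module-level table (its own copy) and the loop flattening it into a name → group dict
def pvGroupTable : List (String × List String) := [
  ("integer", ["BIT", "TINYINT", "SMALLINT", "MEDIUMINT", "INT", "INTEGER", "BIGINT"]),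
  ("real", ["FLOAT", "DOUBLE", "DECIMAL", "DOUBLE PRECISION"]),
  ("string", ["CHAR", "VARCHAR", "TINYTEXT", "TEXT", "MEDIUMTEXT", "LONGTEXT"]),
  ("binary", ["BINARY", "VARBINARY", "TINYBLOB", "BLOB", "MEDIUMBLOB", "LONGBLOB"]),
  ("date", ["DATE", "TIME", "YEAR", "DATETIME", "TIMESTAMP"]),
  ("enum", ["ENUM", "SET"])]

def pvTypeGroup : PySem.Dict String String :=
  pvGroupTable.foldl (fun d g => g.2.foldl (fun d n => d.insert n g.1) d) PySem.Dict.empty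

def pvBase (s : String) : String :=
  if PySem.Str.isIn "(" s
  then PySem.Str.strip (((PySem.Str.split? s "(").getD []).headD "")
  else s

def compareType_alt (sol : String) (user : String) : Bool :=
  let g1 := pvTypeGroup.get? (PySem.Str.upper (pvBase sol))
  let g2 := pvTypeGroup.get? (PySem.Str.upper (pvBase user))
  g1.isSome && g1 == g2

-- ===== PRECONDITION & SPEC =====
def Spec_compareType (sol : String) (user : String) (out : Bool) : Prop := out = compareType_alt sol user
instance (sol : String) (user : String) (out : Bool) : Decidable (Spec_compareType sol user out) := by unfold Spec_compareType; infer_instance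

-- ===== CLAIM (what is proved, stated in full; the proofs are below) =====
def Claim_equal_compareType : Prop := ∀ (sol : String) (user : String), Dom_compareType sol user → Spec_compareType sol user (compareType sol user)

-- ===== LEMMAS AND PROOFS =====

set_option maxRecDepth 8000 in
lemma pvMem1 (x : String) :
    (["BIT", "TINYINT", "SMALLINT", "MEDIUMINT", "INT", "INTEGER", "BIGINT"] : List String).contains x
      = (pvTypeGroup.get? x == some "integer") := by
  rw [Bool.eq_iff_iff]
  rw [beq_iff_eq, PySem.Dict.get?_eq_some_iff_mem_items _ _ _ (by decide)]
  rw [show pvTypeGroup.items = pvGroupTypes.flatMap (fun g => g.2.map (fun n => (n, g.1))) from by decide]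
  simp only [pvGroupTypes, List.flatMap_cons, List.flatMap_nil, List.map_cons, List.map_nil,
    List.append_nil, List.cons_append, List.nil_append, List.mem_cons, List.not_mem_nil,
    Prod.mk.injEq, List.contains_cons, List.contains_nil, Bool.or_false, Bool.or_eq_true,
    beq_iff_eq, or_false]
  simp [eq_comm]

set_option maxRecDepth 8000 in
lemma pvMem2 (x : String) :
    (["FLOAT", "DOUBLE", "DECIMAL", "DOUBLE PRECISION"] : List String).contains x
      = (pvTypeGroup.get? x == some "real") := by
  rw [Bool.eq_iff_iff]
  rw [beq_iff_eq, PySem.Dict.get?_eq_some_iff_mem_items _ _ _ (by decide)]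
  rw [show pvTypeGroup.items = pvGroupTypes.flatMap (fun g => g.2.map (fun n => (n, g.1))) from by decide]
  simp only [pvGroupTypes, List.flatMap_cons, List.flatMap_nil, List.map_cons, List.map_nil,
    List.append_nil, List.cons_append, List.nil_append, List.mem_cons, List.not_mem_nil,
    Prod.mk.injEq, List.contains_cons, List.contains_nil, Bool.or_false, Bool.or_eq_true,
    beq_iff_eq, or_false]
  simp [eq_comm]

set_option maxRecDepth 8000 in
lemma pvMem3 (x : String) :
    (["CHAR", "VARCHAR", "TINYTEXT", "TEXT", "MEDIUMTEXT", "LONGTEXT"] : List String).contains x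
      = (pvTypeGroup.get? x == some "string") := by
  rw [Bool.eq_iff_iff]
  rw [beq_iff_eq, PySem.Dict.get?_eq_some_iff_mem_items _ _ _ (by decide)]
  rw [show pvTypeGroup.items = pvGroupTypes.flatMap (fun g => g.2.map (fun n => (n, g.1))) from by decide]
  simp only [pvGroupTypes, List.flatMap_cons, List.flatMap_nil, List.map_cons, List.map_nil,
    List.append_nil, List.cons_append, List.nil_append, List.mem_cons, List.not_mem_nil,
    Prod.mk.injEq, List.contains_cons, List.contains_nil, Bool.or_false, Bool.or_eq_true,
    beq_iff_eq, or_false]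
  simp [eq_comm]

set_option maxRecDepth 8000 in
lemma pvMem4 (x : String) :
    (["BINARY", "VARBINARY", "TINYBLOB", "BLOB", "MEDIUMBLOB", "LONGBLOB"] : List String).contains x
      = (pvTypeGroup.get? x == some "binary") := by
  rw [Bool.eq_iff_iff]
  rw [beq_iff_eq, PySem.Dict.get?_eq_some_iff_mem_items _ _ _ (by decide)]
  rw [show pvTypeGroup.items = pvGroupTypes.flatMap (fun g => g.2.map (fun n => (n, g.1))) from by decide]
  simp only [pvGroupTypes, List.flatMap_cons, List.flatMap_nil, List.map_cons, List.map_nil,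
    List.append_nil, List.cons_append, List.nil_append, List.mem_cons, List.not_mem_nil,
    Prod.mk.injEq, List.contains_cons, List.contains_nil, Bool.or_false, Bool.or_eq_true,
    beq_iff_eq, or_false]
  simp

set_option maxRecDepth 8000 in
lemma pvMem5 (x : String) :
    (["DATE", "TIME", "YEAR", "DATETIME", "TIMESTAMP"] : List String).contains x
      = (pvTypeGroup.get? x == some "date") := by
  rw [Bool.eq_iff_iff]
  rw [beq_iff_eq, PySem.Dict.get?_eq_some_iff_mem_items _ _ _ (by decide)]
  rw [show pvTypeGroup.items = pvGroupTypes.flatMap (fun g => g.2.map (fun n => (n, g.1))) from by decide]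
  simp only [pvGroupTypes, List.flatMap_cons, List.flatMap_nil, List.map_cons, List.map_nil,
    List.append_nil, List.cons_append, List.nil_append, List.mem_cons, List.not_mem_nil,
    Prod.mk.injEq, List.contains_cons, List.contains_nil, Bool.or_false, Bool.or_eq_true,
    beq_iff_eq, or_false]
  simp [eq_comm]

set_option maxRecDepth 8000 in
lemma pvMem6 (x : String) :
    (["ENUM", "SET"] : List String).contains x
      = (pvTypeGroup.get? x == some "enum") := by
  rw [Bool.eq_iff_iff]
  rw [beq_iff_eq, PySem.Dict.get?_eq_some_iff_mem_items _ _ _ (by decide)]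
  rw [show pvTypeGroup.items = pvGroupTypes.flatMap (fun g => g.2.map (fun n => (n, g.1))) from by decide]
  simp only [pvGroupTypes, List.flatMap_cons, List.flatMap_nil, List.map_cons, List.map_nil,
    List.append_nil, List.cons_append, List.nil_append, List.mem_cons, List.not_mem_nil,
    Prod.mk.injEq, List.contains_cons, List.contains_nil, Bool.or_false, Bool.or_eq_true,
    beq_iff_eq, or_false]
  simp [eq_comm]

set_option maxRecDepth 8000 in
lemma pvRange (x : String) :
    pvTypeGroup.get? x = none ∨ pvTypeGroup.get? x ∈ ([some "integer", some "real", some "string", some "binary", some "date", some "enum"] : List (Option String)) := by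
  cases h : pvTypeGroup.get? x with
  | none => exact Or.inl rfl
  | some v =>
    right
    have hm := (PySem.Dict.get?_eq_some_iff_mem_items pvTypeGroup x v (by decide)).mp h
    have hv : ∀ p ∈ pvTypeGroup.items, p.2 ∈ (["integer", "real", "string", "binary", "date", "enum"] : List String) := by decide
    have := hv _ hm
    simpa using this

lemma pvCore (x y : String) :
    pvGroupTypes.any (fun g => g.2.contains x && g.2.contains y)
      = ((pvTypeGroup.get? x).isSome && pvTypeGroup.get? x == pvTypeGroup.get? y) := by
  have hx := pvRange x
  have hy := pvRange y
  simp only [List.mem_cons, List.not_mem_nil, or_false] at hx hy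
  simp only [pvGroupTypes, List.any_cons, List.any_nil, Bool.or_false,
    pvMem1, pvMem2, pvMem3, pvMem4, pvMem5, pvMem6]
  rcases hx with h | h | h | h | h | h | h <;>
    rcases hy with h' | h' | h' | h' | h' | h' | h' <;>
    rw [h, h'] <;> rfl

-- ===== VERDICT (by name: the statement is the Claim_ definition above) =====
theorem compareType_spec : Claim_equal_compareType := by
  intro sol user _
  unfold Spec_compareType compareType compareType_alt pvBase
  exact pvCore _ _
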